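-- pv_equiv track=rewrite | github.com/inteligencia-artificial-e-afins/first-scrapper-Vi1ctor | 01/exercises.py | contar_subconjuntos_crescentes
-- ===== SOURCE A (Python) =====
-- def contar_subconjuntos_crescentes(numeros):
--     total = 0
--
--     for i in range(len(numeros)):
--         subconjunto = [numeros[i]]
--
--         for j in range(i + 1, len(numeros)):
--             if numeros[j] > subconjunto[-1]:
--                 subconjunto.append(numeros[j])
--                 total += 1
--
--         total += 1
--
--     return total
-- ===== SOURCE B (Python) =====
-- def contar_subconjuntos_crescentes(numeros):
--     # One right-to-left pass with a monotonic stack of (value, chain_length) pairs,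
--     # using chain(i) = 1 + chain(first later index with a greater value).
--     stack = []
--     total = 0
--     for x in reversed(numeros):
--         while stack and stack[-1][0] <= x:
--             stack.pop()
--         c = 1 + (stack[-1][1] if stack else 0)
--         stack.append((x, c))
--         total += c
--     return total
-- ===== Notes on version B (the rewrite author's own statement) =====
-- stated objective: faster
-- what changed: Replaces the nested greedy scan from every start index by one right-to-left pass with a monotonic stack holding (value, chain-length) pairs, using chain(i) = 1 + chain(next-greater(i)).
import Mathlib
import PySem

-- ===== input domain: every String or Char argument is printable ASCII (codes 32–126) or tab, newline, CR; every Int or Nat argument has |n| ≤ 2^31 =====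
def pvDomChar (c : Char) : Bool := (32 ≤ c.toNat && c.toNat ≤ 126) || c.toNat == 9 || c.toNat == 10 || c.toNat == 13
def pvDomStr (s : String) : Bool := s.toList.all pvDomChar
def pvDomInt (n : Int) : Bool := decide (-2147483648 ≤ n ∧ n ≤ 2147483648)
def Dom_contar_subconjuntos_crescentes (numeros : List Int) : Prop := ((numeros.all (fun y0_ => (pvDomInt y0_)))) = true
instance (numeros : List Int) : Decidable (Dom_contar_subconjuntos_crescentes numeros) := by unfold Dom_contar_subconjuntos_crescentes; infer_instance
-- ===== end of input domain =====

-- B replaces A's nested greedy scans by one right-to-left monotonic-stack pass (objective: faster).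

-- ===== PORT A =====
def contar_subconjuntos_crescentes (numeros : List Int) : Int :=
  (PySem.List.pyRange 0 numeros.length 1).foldl
    (fun total i =>
      ((PySem.List.pyRange (i + 1) numeros.length 1).foldl
        (fun (st : List Int × Int) j =>
          if PySem.List.pyGetD numeros j 0 > PySem.List.pyGetD st.1 (-1) 0 then
            (st.1 ++ [PySem.List.pyGetD numeros j 0], st.2 + 1)
          else st)
        ([PySem.List.pyGetD numeros i 0], total)).2 + 1)
    0

-- ===== PORT B =====
-- the 'while stack and stack[-1][0] <= x: stack.pop()' loop (stack top kept at the head here)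
def pvPopLE (x : Int) : List (Int × Int) → List (Int × Int)
  | [] => []
  | (v, c) :: rest => if v ≤ x then pvPopLE x rest else (v, c) :: rest

-- 'stack[-1][1] if stack else 0'
def pvTopC : List (Int × Int) → Int
  | [] => 0
  | (_, c) :: _ => c

-- one iteration of the 'for x in reversed(numeros)' body
def pvStep (st : List (Int × Int) × Int) (x : Int) : List (Int × Int) × Int :=
  let s := pvPopLE x st.1
  let c := 1 + pvTopC s
  ((x, c) :: s, st.2 + c)

def contar_subconjuntos_crescentes_alt (numeros : List Int) : Int :=
  (numeros.reverse.foldl pvStep ([], 0)).2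

-- ===== PRECONDITION & SPEC =====
def Spec_contar_subconjuntos_crescentes (numeros : List Int) (out : Int) : Prop := out = contar_subconjuntos_crescentes_alt numeros
instance (numeros : List Int) (out : Int) : Decidable (Spec_contar_subconjuntos_crescentes numeros out) := by unfold Spec_contar_subconjuntos_crescentes; infer_instance

-- ===== CLAIM (what is proved, stated in full; the proofs are below) =====
def Claim_equal_contar_subconjuntos_crescentes : Prop := ∀ (numeros : List Int), Dom_contar_subconjuntos_crescentes numeros → Spec_contar_subconjuntos_crescentes numeros (contar_subconjuntos_crescentes numeros)

-- ===== LEMMAS AND PROOFS =====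

-- length of the greedy increasing chain starting at x through l
def pvChain (x : Int) : List Int → Int
  | [] => 1
  | y :: ys => if x < y then 1 + pvChain y ys else pvChain x ys

-- sum of greedy chain lengths from every position
def pvTotal : List Int → Int
  | [] => 0
  | x :: ys => pvChain x ys + pvTotal ys

theorem pvTopC_cons (v c : Int) (s : List (Int × Int)) : pvTopC ((v, c) :: s) = c := rfl

theorem pvStep_def (st : List (Int × Int) × Int) (x : Int) :
    pvStep st x = ((x, 1 + pvTopC (pvPopLE x st.1)) :: pvPopLE x st.1,
                   st.2 + (1 + pvTopC (pvPopLE x st.1))) := rfl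

theorem pvPopLE_cons_le {v x : Int} (c : Int) (s : List (Int × Int)) (h : v ≤ x) :
    pvPopLE x ((v, c) :: s) = pvPopLE x s := by simp [pvPopLE, h]

theorem pvPopLE_cons_gt {v x : Int} (c : Int) (s : List (Int × Int)) (h : ¬ v ≤ x) :
    pvPopLE x ((v, c) :: s) = (v, c) :: s := by simp [pvPopLE, h]

-- once everything ≤ x is popped, popping ≤ z (with x ≤ z) from the result is popping from the original
theorem pvPopLE_popLE (x z : Int) (h : x ≤ z) (s : List (Int × Int)) :
    pvPopLE z (pvPopLE x s) = pvPopLE z s := by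
  induction s with
  | nil => rfl
  | cons p rest ih =>
    obtain ⟨v, c⟩ := p
    by_cases hv : v ≤ x
    · rw [pvPopLE_cons_le c rest hv, ih, pvPopLE_cons_le c rest (le_trans hv h)]
    · rw [pvPopLE_cons_gt c rest hv]

-- the B-side stack invariant: after processing l right to left, the stack answers pvChain queries
theorem pvAlt_inv (l : List Int) :
    (∀ z : Int, pvTopC (pvPopLE z ((l.reverse.foldl pvStep ([], 0)).1)) + 1 = pvChain z l) ∧
    (l.reverse.foldl pvStep ([], 0)).2 = pvTotal l := by
  induction l with
  | nil => exact ⟨fun z => by simp [pvPopLE, pvTopC, pvChain], rfl⟩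
  | cons x l ih =>
    obtain ⟨ih1, ih2⟩ := ih
    have hrev : (x :: l).reverse = l.reverse ++ [x] := by simp
    rw [hrev, List.foldl_append, List.foldl_cons, List.foldl_nil, pvStep_def]
    constructor
    · intro z
      by_cases hz : x ≤ z
      · rw [pvPopLE_cons_le _ _ hz, pvPopLE_popLE x z hz, ih1 z]
        simp [pvChain, not_lt.2 hz]
      · rw [pvPopLE_cons_gt _ _ hz]
        have h1 := ih1 x
        rw [pvTopC_cons]
        simp only [pvChain, if_pos (lt_of_not_ge hz)]
        omega
    · have h1 := ih1 x
      simp only [pvTotal]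
      omega

theorem pvAlt_eq_total (l : List Int) : contar_subconjuntos_crescentes_alt l = pvTotal l := by
  unfold contar_subconjuntos_crescentes_alt
  exact (pvAlt_inv l).2

-- A's inner loop over a suffix, with the running last element x at the end of subconjunto
theorem pvInner_eq (l : List Int) : ∀ (x : Int) (sub : List Int) (t : Int),
    (l.foldl
      (fun (st : List Int × Int) y =>
        if y > PySem.List.pyGetD st.1 (-1) 0 then (st.1 ++ [y], st.2 + 1) else st)
      (sub ++ [x], t)).2 = t + pvChain x l - 1 := by
  induction l with
  | nil => intro x sub t; simp [pvChain]
  | cons y ys ih =>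
    intro x sub t
    simp only [List.foldl_cons]
    rw [PySem.List.pyGetD_neg_one_append_singleton]
    by_cases h : x < y
    · rw [if_pos (by exact h)]
      have := ih y (sub ++ [x]) (t + 1)
      simp only [List.append_assoc] at this ⊢
      rw [this]
      simp [pvChain, h]; omega
    · rw [if_neg (by exact h)]
      rw [ih x sub t]
      simp [pvChain, h]

-- A's outer loop, starting from index a
theorem pvOuter_eq (numeros : List Int) : ∀ (k : Nat) (a : Nat) (t : Int),
    a + k = numeros.length →
    (PySem.List.pyRange (a : Int) numeros.length 1).foldl
      (fun total i =>
        ((PySem.List.pyRange (i + 1) numeros.length 1).foldl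
          (fun (st : List Int × Int) j =>
            if PySem.List.pyGetD numeros j 0 > PySem.List.pyGetD st.1 (-1) 0 then
              (st.1 ++ [PySem.List.pyGetD numeros j 0], st.2 + 1)
            else st)
          ([PySem.List.pyGetD numeros i 0], total)).2 + 1)
      t = t + pvTotal (numeros.drop a) := by
  intro k
  induction k with
  | zero =>
    intro a t ha
    rw [PySem.List.pyRange_one_eq_nil (by omega)]
    rw [List.foldl_nil, List.drop_of_length_le (by omega)]
    simp [pvTotal]
  | succ k ih =>
    intro a t ha
    have hlt : (a : Int) < (numeros.length : Int) := by
      omega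
    rw [PySem.List.pyRange_one_cons hlt, List.foldl_cons]
    rw [PySem.List.foldl_pyRange_pyGetD' numeros 0
      (fun st y => if y > PySem.List.pyGetD st.1 (-1) 0 then (st.1 ++ [y], st.2 + 1) else st)
      _ (by omega : (0:Int) ≤ (a : Int) + 1)]
    have hx : ([PySem.List.pyGetD numeros (a : Int) 0] : List Int)
        = [] ++ [PySem.List.pyGetD numeros (a : Int) 0] := by simp
    rw [hx, pvInner_eq]
    have ha' : a < numeros.length := by omega
    have hget : PySem.List.pyGetD numeros ((a : Nat) : Int) 0 = numeros[a] :=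
      PySem.List.pyGetD_ofNat numeros a 0 ha'
    have hcast : ((a : Int) + 1) = ((a + 1 : Nat) : Int) := by push_cast; ring
    rw [hcast, ih (a + 1) _ (by omega)]
    have hdrop : numeros.drop a = numeros[a] :: numeros.drop (a + 1) :=
      List.drop_eq_getElem_cons ha'
    rw [Int.toNat_natCast, hget, hdrop]
    simp only [pvTotal]
    omega

theorem pvA_eq_total (l : List Int) : contar_subconjuntos_crescentes l = pvTotal l := by
  unfold contar_subconjuntos_crescentes
  have := pvOuter_eq l l.length 0 0 (by omega)
  simpa using this

-- ===== VERDICT (by name: the statement is the Claim_ definition above) =====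
theorem contar_subconjuntos_crescentes_spec : Claim_equal_contar_subconjuntos_crescentes := by
  intro numeros _
  unfold Spec_contar_subconjuntos_crescentes
  rw [pvA_eq_total, pvAlt_eq_total]
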